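-- pv_equiv track=rewrite | github.com/jginsburgn/us-macro-calendar | scripts/update_calendar.py | annotate_source
-- ===== SOURCE A (Python) =====
-- def annotate_source(event_lines, source_tag):
--     """
--     Add a source marker (BLS / BEA) into DESCRIPTION or as COMMENT.
--     """
--     out = []
--     inserted = False
--     for line in event_lines:
--         out.append(line)
--         if not inserted and line.startswith("DESCRIPTION:"):
--             out.append(f"  (Source: {source_tag})")
--             inserted = True
--     if not inserted:
--         out.insert(1, f"COMMENT:Source={source_tag}")
--     return out
-- ===== SOURCE B (Python) =====
-- def annotate_source(event_lines, source_tag):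
--     """Find-then-splice: locate the first DESCRIPTION: line, splice the marker after it."""
--     for i, line in enumerate(event_lines):
--         if line.startswith("DESCRIPTION:"):
--             return event_lines[:i + 1] + [f"  (Source: {source_tag})"] + event_lines[i + 1:]
--     out = list(event_lines)
--     out.insert(1, f"COMMENT:Source={source_tag}")
--     return out
-- ===== Notes on version B (the rewrite author's own statement) =====
-- stated objective: simpler
-- what changed: Replaces the append-every-line loop with a flag by a find-the-first-DESCRIPTION-index scan followed by a single list splice (or insert(1,..) when absent).
import Mathlib
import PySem

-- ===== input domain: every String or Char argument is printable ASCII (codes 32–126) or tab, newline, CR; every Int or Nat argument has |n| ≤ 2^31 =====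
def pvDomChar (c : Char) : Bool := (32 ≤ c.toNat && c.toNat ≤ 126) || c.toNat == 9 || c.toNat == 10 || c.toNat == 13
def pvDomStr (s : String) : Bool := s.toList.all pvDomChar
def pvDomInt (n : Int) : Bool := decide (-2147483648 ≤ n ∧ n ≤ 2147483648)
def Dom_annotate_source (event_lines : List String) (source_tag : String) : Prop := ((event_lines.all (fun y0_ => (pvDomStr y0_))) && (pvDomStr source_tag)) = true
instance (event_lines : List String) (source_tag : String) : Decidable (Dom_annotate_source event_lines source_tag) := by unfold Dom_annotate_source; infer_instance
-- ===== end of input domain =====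

-- B replaces A's append-every-line loop with a flag by a find-the-first-DESCRIPTION-index
-- scan followed by a single splice (objective: simpler).

-- ===== PORT A =====
-- the loop body of A: append line; after the first DESCRIPTION: line also append the marker
def pvLoopA (tag : String) (s : List String × Bool) (line : String) : List String × Bool :=
  let out := s.1 ++ [line]
  if !s.2 && PySem.Str.startswith line "DESCRIPTION:" then
    (out ++ ["  (Source: " ++ tag ++ ")"], true)
  else
    (out, s.2)

def annotate_source (event_lines : List String) (source_tag : String) : List String :=
  let st := event_lines.foldl (pvLoopA source_tag) ([], false)
  if !st.2 then PySem.List.insert st.1 1 ("COMMENT:Source=" ++ source_tag) else st.1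

-- ===== PORT B =====
-- index of the first line starting with "DESCRIPTION:" (the for/enumerate scan of Source B)
def pvFindDesc : List String → Option Nat
  | [] => none
  | l :: ls =>
    if PySem.Str.startswith l "DESCRIPTION:" then some 0
    else (pvFindDesc ls).map (· + 1)

def annotate_source_alt (event_lines : List String) (source_tag : String) : List String :=
  match pvFindDesc event_lines with
  | some i => event_lines.take (i + 1) ++ ["  (Source: " ++ source_tag ++ ")"] ++ event_lines.drop (i + 1)
  | none => PySem.List.insert event_lines 1 ("COMMENT:Source=" ++ source_tag)

-- ===== PRECONDITION & SPEC =====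
def Spec_annotate_source (event_lines : List String) (source_tag : String) (out : List String) : Prop := out = annotate_source_alt event_lines source_tag
instance (event_lines : List String) (source_tag : String) (out : List String) : Decidable (Spec_annotate_source event_lines source_tag out) := by unfold Spec_annotate_source; infer_instance

-- ===== CLAIM (what is proved, stated in full; the proofs are below) =====
def Claim_equal_annotate_source : Prop := ∀ (event_lines : List String) (source_tag : String), Dom_annotate_source event_lines source_tag → Spec_annotate_source event_lines source_tag (annotate_source event_lines source_tag)

-- ===== LEMMAS AND PROOFS =====
theorem loopA_true (tag : String) (ls : List String) (acc : List String) :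
    ls.foldl (pvLoopA tag) (acc, true) = (acc ++ ls, true) := by
  induction ls generalizing acc with
  | nil => simp
  | cons l ls ih => simp [pvLoopA, ih]

theorem loopA_false (tag : String) (ls : List String) (acc : List String) :
    ls.foldl (pvLoopA tag) (acc, false) =
      match pvFindDesc ls with
      | some i => (acc ++ ls.take (i + 1) ++ ["  (Source: " ++ tag ++ ")"] ++ ls.drop (i + 1), true)
      | none => (acc ++ ls, false) := by
  induction ls generalizing acc with
  | nil => simp [pvFindDesc]
  | cons l ls ih =>
    by_cases h : PySem.Chars.startswith l.toList ['D','E','S','C','R','I','P','T','I','O','N',':'] = true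
    · simp [pvFindDesc, h, pvLoopA, loopA_true]
    · cases hfd : pvFindDesc ls with
      | none => simp [pvFindDesc, h, pvLoopA, ih, hfd]
      | some i => simp [pvFindDesc, h, pvLoopA, ih, hfd]

-- ===== VERDICT (by name: the statement is the Claim_ definition above) =====
theorem annotate_source_spec : Claim_equal_annotate_source := by
  intro el tag _
  unfold Spec_annotate_source annotate_source annotate_source_alt
  rw [loopA_false]
  cases hfd : pvFindDesc el with
  | none => simp
  | some i => simp
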